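-- pv_equiv track=rewrite | github.com/NikhilEnjirapu/ai-video-generator | backend/services/enhanced_video_service.py | _assign_scene_types
-- ===== SOURCE A (Python) =====
-- def _assign_scene_types(num_sentences: int) -> list:
--     """Assign scene types to sentences for visual variety"""
--     scene_types = []
--
--     for i in range(num_sentences):
--         if i == 0:
--             scene_types.append('intro')
--         elif i == num_sentences - 1:
--             scene_types.append('conclusion')
--         elif i % 3 == 0:
--             scene_types.append('highlight')
--         else:
--             scene_types.append('content')
--
--     return scene_types
-- ===== SOURCE B (Python) =====
-- def _assign_scene_types(num_sentences: int) -> list: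
--     """Assign scene types to sentences for visual variety"""
--     if num_sentences <= 0:
--         return []
--     if num_sentences == 1:
--         return ['intro']
--     middle = (['content', 'content', 'highlight'] * (num_sentences // 3 + 1))[:num_sentences - 2]
--     return ['intro'] + middle + ['conclusion']
-- ===== Notes on version B (the rewrite author's own statement) =====
-- stated objective: alternative
-- what changed: Instead of a loop with a 4-way branch per index, B exploits the period-3 structure: it builds the middle section by multiplying the tile ['content','content','highlight'] and slicing it to length n-2, then concatenates ['intro'] + middle + ['conclusion'].
import Mathlib
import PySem

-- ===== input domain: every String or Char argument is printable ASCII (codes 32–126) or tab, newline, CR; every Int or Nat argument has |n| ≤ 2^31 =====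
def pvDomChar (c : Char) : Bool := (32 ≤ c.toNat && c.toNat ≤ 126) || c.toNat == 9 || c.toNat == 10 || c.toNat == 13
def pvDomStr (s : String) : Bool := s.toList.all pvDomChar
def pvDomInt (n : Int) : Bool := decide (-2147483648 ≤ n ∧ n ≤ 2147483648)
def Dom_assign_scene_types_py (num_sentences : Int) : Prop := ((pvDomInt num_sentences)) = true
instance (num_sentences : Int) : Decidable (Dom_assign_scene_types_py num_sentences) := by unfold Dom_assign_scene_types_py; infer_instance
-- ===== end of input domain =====

-- B replaces A's per-index loop with a periodic tiling: it multiplies the period-3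
-- tile ['content','content','highlight'], slices it to the middle length and
-- concatenates 'intro' ++ middle ++ 'conclusion'; objective: alternative, same cost.

-- ===== PORT A =====
def assign_scene_types_py (num_sentences : Int) : List String :=
  (PySem.List.pyRange 0 num_sentences 1).foldl (fun scene_types i =>
    scene_types ++ [if i == 0 then "intro"
      else if i == num_sentences - 1 then "conclusion"
      else if PySem.Int.mod i 3 == 0 then "highlight"
      else "content"]) []

-- ===== PORT B =====
def assign_scene_types_py_alt (num_sentences : Int) : List String :=
  if num_sentences ≤ 0 then []
  else if num_sentences == 1 then ["intro"]
  else
    -- (['content','content','highlight'] * (n // 3 + 1))[:n - 2]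
    -- list * k = flatten of k copies; the slice bound n - 2 is ≥ 0 here, so [:n-2] = take
    let middle := ((List.replicate (PySem.Int.floordiv num_sentences 3 + 1).toNat
        ["content", "content", "highlight"]).flatten).take (num_sentences - 2).toNat
    ["intro"] ++ middle ++ ["conclusion"]

-- ===== PRECONDITION & SPEC =====
def Spec_assign_scene_types_py (num_sentences : Int) (out : List String) : Prop := out = assign_scene_types_py_alt num_sentences
instance (num_sentences : Int) (out : List String) : Decidable (Spec_assign_scene_types_py num_sentences out) := by unfold Spec_assign_scene_types_py; infer_instance

-- ===== CLAIM (what is proved, stated in full; the proofs are below) =====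
def Claim_equal_assign_scene_types_py : Prop := ∀ (num_sentences : Int), Dom_assign_scene_types_py num_sentences → Spec_assign_scene_types_py num_sentences (assign_scene_types_py num_sentences)

-- ===== LEMMAS AND PROOFS =====

-- A as a map over List.range
lemma assignA_eq_map (n : Int) :
    assign_scene_types_py n =
      (List.range n.toNat).map (fun (k : Nat) =>
        if ((k : Int) == 0) = true then "intro"
        else if ((k : Int) == n - 1) = true then "conclusion"
        else if (PySem.Int.mod (k : Int) 3 == 0) = true then "highlight"
        else "content") := by
  unfold assign_scene_types_py
  rw [PySem.List.foldl_append_singleton_eq_map, PySem.List.pyRange_one, List.map_map]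
  simp only [List.nil_append, Int.sub_zero]
  apply List.map_congr_left
  intro k _
  simp

-- the flattened tiling is periodic with period 3
lemma flatten_replicate_getElem? (m j : Nat) (t : List String) (ht : t.length = 3)
    (hj : j < 3 * m) :
    ((List.replicate m t).flatten)[j]? = t[j % 3]? := by
  induction m generalizing j with
  | zero => omega
  | succ m ih =>
    rw [List.replicate_succ, List.flatten_cons]
    by_cases h3 : j < 3
    · rw [List.getElem?_append_left (by omega), Nat.mod_eq_of_lt h3]
    · rw [List.getElem?_append_right (by omega), ht]
      have hmod : (j - 3) % 3 = j % 3 := by omega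
      rw [ih (j - 3) (by omega), hmod]

theorem assign_scene_types_py_equal (n : Int) :
    assign_scene_types_py n = assign_scene_types_py_alt n := by
  by_cases hn : n ≤ 0
  · unfold assign_scene_types_py_alt
    rw [assignA_eq_map]
    simp [Int.toNat_of_nonpos hn, hn]
  · by_cases hn1 : n = 1
    · subst hn1; decide
    · have hn2 : 2 ≤ n := by omega
      have hfd : PySem.Int.floordiv n 3 = n / 3 :=
        PySem.Int.floordiv_eq_ediv_of_pos (by norm_num)
      unfold assign_scene_types_py_alt
      rw [if_neg (by omega), if_neg (by simp; omega), hfd]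
      set m := (n / 3 + 1).toNat with hm
      have h3m : (n - 2).toNat ≤ 3 * m := by
        have h1 : 3 * (n / 3) + n % 3 = n := by omega
        have h2 : 0 ≤ n % 3 := Int.emod_nonneg n (by norm_num)
        omega
      have hflatlen : ((List.replicate m
          (["content", "content", "highlight"] : List String)).flatten).length = 3 * m := by
        simp [List.length_flatten, Nat.mul_comm]
      set mid := ((List.replicate m
          (["content", "content", "highlight"] : List String)).flatten).take (n - 2).toNat
        with hmid
      have hmidlen : mid.length = (n - 2).toNat := by
        rw [hmid, List.length_take, hflatlen]; omega
      rw [assignA_eq_map]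
      apply List.ext_getElem?
      intro k
      rw [List.getElem?_map]
      simp only [List.cons_append, List.nil_append]
      by_cases hk : k < n.toNat
      · rw [List.getElem?_range hk, Option.map_some]
        by_cases hk0 : k = 0
        · subst hk0; simp
        · obtain ⟨j, rfl⟩ : ∃ j, k = j + 1 := ⟨k - 1, by omega⟩
          have h0 : ((((j + 1 : Nat) : Int)) == 0) = false := by simp; omega
          rw [List.getElem?_cons_succ, h0, if_neg (by simp)]
          by_cases hklast : j + 1 = n.toNat - 1
          · have h1 : ((((j + 1 : Nat) : Int)) == n - 1) = true := by simp; omega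
            rw [h1, if_pos rfl,
              List.getElem?_append_right (by rw [hmidlen]; omega), hmidlen]
            have hz : j - (n - 2).toNat = 0 := by omega
            rw [hz]; rfl
          · have h1 : ((((j + 1 : Nat) : Int)) == n - 1) = false := by simp; omega
            rw [h1, if_neg (by simp), PySem.Int.mod_eq_emod_of_pos (by norm_num),
              List.getElem?_append_left (by rw [hmidlen]; omega), hmid,
              List.getElem?_take_of_lt (by omega),
              flatten_replicate_getElem? m j _ (by rfl) (by omega)]
            by_cases hmod : (j + 1) % 3 = 0
            · have hb : ((((j + 1 : Nat) : Int) % 3) == 0) = true := by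
                simp; omega
              have hj2 : j % 3 = 2 := by omega
              rw [hb, if_pos rfl, hj2]; rfl
            · have hb : ((((j + 1 : Nat) : Int) % 3) == 0) = false := by
                simp; omega
              have hj01 : j % 3 = 0 ∨ j % 3 = 1 := by omega
              rw [hb, if_neg (by simp)]
              rcases hj01 with h | h <;> rw [h] <;> rfl
      · have h1 : (List.range n.toNat)[k]? = none := by simp; omega
        have h2 : (("intro" :: (mid ++ ["conclusion"])) : List String)[k]? = none := by
          apply List.getElem?_eq_none
          simp [hmidlen]; omega
        rw [h1, h2]; rfl

-- ===== VERDICT (by name: the statement is the Claim_ definition above) =====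
theorem assign_scene_types_py_spec : Claim_equal_assign_scene_types_py := by
  intro n _
  unfold Spec_assign_scene_types_py
  exact assign_scene_types_py_equal n
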